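-- pv_equiv track=rewrite | github.com/requalto10/syuron | MAPF/ProbSAT/trash/gen_3cnf_new.py | add_3cnf_clauses
-- ===== SOURCE A (Python) =====
-- def add_3cnf_clauses(clauses, clause, max_literals=3, next_var=0):
--     """
--     Adds a clause to the clauses list, breaking it into multiple clauses if necessary to ensure
--     each clause has at most max_literals literals.
--
--     Parameters:
--     - clauses: list of existing clauses
--     - clause: clause to add (list of literals)
--     - max_literals: maximum number of literals in a clause
--     - next_var: the next available auxiliary variable index
--
--     Returns:
--     - next_var: updated next available auxiliary variable index
--     """
--     while len(clause) > max_literals: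
--         new_clause = clause[:max_literals-1] + [next_var]
--         clauses.append(new_clause)
--         clause = [-next_var] + clause[max_literals-1:]
--         next_var += 1
--     clauses.append(clause)
--     return next_var
-- ===== SOURCE B (Python) =====
-- def add_3cnf_clauses(clauses, clause, max_literals=3, next_var=0):
--     """Single pass with an index pointer into the original clause (instead of repeatedly
--     rebuilding the shrinking remainder list). Same mutation of `clauses`, same
--     return value."""
--     n = len(clause)
--     if n <= max_literals:
--         clauses.append(clause)
--         return next_var
--     step = max_literals - 2
--     cut = max_literals - 1
--     clauses.append(clause[:cut] + [next_var])
--     i = cut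
--     v = next_var
--     while n - i + 1 > max_literals:
--         clauses.append([-v] + clause[i:i + step] + [v + 1])
--         v += 1
--         i += step
--     clauses.append([-v] + clause[i:])
--     return v + 1
-- ===== Notes on version B (the rewrite author's own statement) =====
-- stated objective: alternative
-- what changed: B walks the original clause once with an index pointer (i += max_literals-2), cutting fixed-size chunks, instead of A's loop that re-builds the remaining clause by concatenating a prefix slice and a suffix slice on every iteration; the equivalence proved is about the return value (both also perform the same append mutation of clauses, verified by testing).
import Mathlib
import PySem

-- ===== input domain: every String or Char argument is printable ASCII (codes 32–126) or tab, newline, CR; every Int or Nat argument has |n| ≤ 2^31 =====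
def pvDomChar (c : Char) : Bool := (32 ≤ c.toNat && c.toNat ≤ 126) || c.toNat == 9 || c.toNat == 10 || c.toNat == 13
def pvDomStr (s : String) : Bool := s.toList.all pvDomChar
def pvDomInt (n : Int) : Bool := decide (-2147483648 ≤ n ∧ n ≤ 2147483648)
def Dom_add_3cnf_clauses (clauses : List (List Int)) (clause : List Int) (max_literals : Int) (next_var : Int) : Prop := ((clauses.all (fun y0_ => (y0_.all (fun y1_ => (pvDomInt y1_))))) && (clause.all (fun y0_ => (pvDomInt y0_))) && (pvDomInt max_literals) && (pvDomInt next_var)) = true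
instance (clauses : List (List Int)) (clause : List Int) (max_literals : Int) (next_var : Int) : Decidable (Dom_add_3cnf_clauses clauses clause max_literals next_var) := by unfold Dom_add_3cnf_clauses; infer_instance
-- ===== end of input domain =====

-- B replaces A's re-slice-and-rebuild loop by a single pass with an index pointer into the
-- original clause; both append the same clauses to `clauses`
-- (same mutation); the theorem is about the return value.


-- ===== PORT A =====
-- A's while loop; fuel (clause.length + 1) only makes the recursion total — under
-- Pre_ the loop exits before the fuel runs out (each iteration shortens clause by ≥ 1).
def addLoopA (fuel : Nat) (clauses : List (List Int)) (clause : List Int) (max_literals : Int) (next_var : Int) : Int :=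
  match fuel with
  | 0 => next_var
  | f + 1 =>
    if max_literals < (clause.length : Int) then
      let new_clause := PySem.List.slice clause none (some (max_literals - 1)) ++ [next_var]
      addLoopA f (clauses ++ [new_clause])
        ((-next_var) :: PySem.List.slice clause (some (max_literals - 1)) none)
        max_literals (next_var + 1)
    else next_var

def add_3cnf_clauses (clauses : List (List Int)) (clause : List Int) (max_literals : Int) (next_var : Int) : Int :=
  addLoopA (clause.length + 1) clauses clause max_literals next_var

-- ===== PORT B =====
-- B's while loop over the index pointer i; fuel clause.length is a totality guard only.
def addLoopB (fuel : Nat) (clauses : List (List Int)) (clause : List Int) (n i step max_literals v : Int) : Int :=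
  match fuel with
  | 0 => v + 1
  | f + 1 =>
    if max_literals < n - i + 1 then
      addLoopB f (clauses ++ [((-v) :: PySem.List.slice clause (some i) (some (i + step))) ++ [v + 1]])
        clause n (i + step) step max_literals (v + 1)
    else v + 1

def add_3cnf_clauses_alt (clauses : List (List Int)) (clause : List Int) (max_literals : Int) (next_var : Int) : Int :=
  let n : Int := clause.length
  if n ≤ max_literals then next_var
  else
    let step := max_literals - 2
    let cut := max_literals - 1
    addLoopB clause.length
      (clauses ++ [PySem.List.slice clause none (some cut) ++ [next_var]])
      clause n cut step max_literals next_var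

-- ===== PRECONDITION & SPEC =====
-- Pre_ excludes exactly the inputs on which A's while loop never terminates:
-- len(clause) > max_literals with max_literals < 3 (the clause then never shrinks below the bound).
def Pre_add_3cnf_clauses (clauses : List (List Int)) (clause : List Int) (max_literals : Int) (next_var : Int) : Prop :=
  (clause.length : Int) ≤ max_literals ∨ 3 ≤ max_literals
instance (clauses : List (List Int)) (clause : List Int) (max_literals : Int) (next_var : Int) : Decidable (Pre_add_3cnf_clauses clauses clause max_literals next_var) := by unfold Pre_add_3cnf_clauses; infer_instance

def pvWitness_add_3cnf_clauses : List (List Int) × List Int × Int × Int := ([[1, 2]], [1, -2, 3, -4, 5], 3, 6)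

def Spec_add_3cnf_clauses (clauses : List (List Int)) (clause : List Int) (max_literals : Int) (next_var : Int) (out : Int) : Prop := out = add_3cnf_clauses_alt clauses clause max_literals next_var
instance (clauses : List (List Int)) (clause : List Int) (max_literals : Int) (next_var : Int) (out : Int) : Decidable (Spec_add_3cnf_clauses clauses clause max_literals next_var out) := by unfold Spec_add_3cnf_clauses; infer_instance

-- ===== CLAIM (what is proved, stated in full; the proofs are below) =====
def Claim_equal_add_3cnf_clauses : Prop := ∀ (clauses : List (List Int)) (clause : List Int) (max_literals : Int) (next_var : Int), Dom_add_3cnf_clauses clauses clause max_literals next_var → Pre_add_3cnf_clauses clauses clause max_literals next_var → Spec_add_3cnf_clauses clauses clause max_literals next_var (add_3cnf_clauses clauses clause max_literals next_var)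

-- ===== LEMMAS AND PROOFS =====

-- Loop correspondence: A's remaining clause always has length n - i + 1, and A's
-- running next_var is B's v + 1.
lemma addLoop_eq (fA : Nat) : ∀ (fB : Nat) (csA csB : List (List Int)) (clauseA clauseO : List Int)
    (n i max_literals v : Int),
    3 ≤ max_literals →
    (clauseA.length : Int) = n - i + 1 →
    n - i + 1 ≤ (fA : Int) →
    n - i + 1 ≤ (fB : Int) →
    addLoopA fA csA clauseA max_literals (v + 1)
      = addLoopB fB csB clauseO n i (max_literals - 2) max_literals v := by
  induction fA with
  | zero =>
    intro fB csA csB clauseA clauseO n i max_literals v hm hlen hfA hfB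
    have h0 : (clauseA.length : Int) = 0 := by omega
    have hcond : ¬ max_literals < n - i + 1 := by omega
    cases fB with
    | zero => simp [addLoopA, addLoopB]
    | succ fb => simp [addLoopA, addLoopB, hcond]
  | succ f ih =>
    intro fB csA csB clauseA clauseO n i max_literals v hm hlen hfA hfB
    by_cases hcond : max_literals < n - i + 1
    · -- both loops take a step
      have hlenA : max_literals < (clauseA.length : Int) := by omega
      cases fB with
      | zero => omega
      | succ fb =>
        simp only [addLoopA, addLoopB, if_pos hlenA, if_pos hcond]
        have hml1 : (0 : Int) ≤ max_literals - 1 := by omega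
        have hnewlen : ((((-(v + 1)) :: PySem.List.slice clauseA (some (max_literals - 1)) none)).length : Int)
            = n - (i + (max_literals - 2)) + 1 := by
          rw [PySem.List.slice_from _ hml1]
          simp only [List.length_cons, List.length_drop]
          have h1 : (max_literals - 1).toNat ≤ clauseA.length := by omega
          push_cast
          omega
        exact ih fb _ _ _ clauseO n (i + (max_literals - 2)) max_literals (v + 1) hm hnewlen
          (by omega) (by omega)
    · -- both loops exit
      have hlenA : ¬ max_literals < (clauseA.length : Int) := by omega
      cases fB with
      | zero => simp [addLoopA, addLoopB, hlenA]
      | succ fb => simp [addLoopA, addLoopB, hlenA, hcond]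

-- ===== VERDICT (by name: the statement is the Claim_ definition above) =====
theorem add_3cnf_clauses_spec : Claim_equal_add_3cnf_clauses := by
  intro clauses clause max_literals next_var _hDom hPre
  unfold Spec_add_3cnf_clauses add_3cnf_clauses add_3cnf_clauses_alt
  by_cases hle : (clause.length : Int) ≤ max_literals
  · -- loop never runs; both return next_var
    have hcond : ¬ max_literals < (clause.length : Int) := by omega
    simp [addLoopA, hcond, hle]
  · -- at least one iteration; Pre_ gives 3 ≤ max_literals
    have hm : 3 ≤ max_literals := by
      rcases hPre with h | h
      · omega
      · exact h
    have hcond : max_literals < (clause.length : Int) := by omega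
    simp only [addLoopA, if_pos hcond, if_neg hle]
    have hnewlen : ((((-next_var) :: PySem.List.slice clause (some (max_literals - 1)) none)).length : Int)
        = (clause.length : Int) - (max_literals - 1) + 1 := by
      rw [PySem.List.slice_from _ (by omega : (0:Int) ≤ max_literals - 1)]
      simp only [List.length_cons, List.length_drop]
      have h1 : (max_literals - 1).toNat ≤ clause.length := by omega
      push_cast
      omega
    exact addLoop_eq clause.length clause.length _ _ _ clause (clause.length : Int)
      (max_literals - 1) max_literals next_var hm hnewlen (by omega) (by omega)
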